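-- pv_equiv track=rewrite | github.com/felixpeng24/algo | 106.py | reachCheckpoint
-- ===== SOURCE A (Python) =====
-- def reachCheckpoint(nums):
--     fuel = 0
--     for num in nums:
--         if fuel < 0:
--             return False
--         else:
--             fuel -= 1
--             fuel += num
--     return True
-- ===== SOURCE B (Python) =====
-- def reachCheckpoint(nums):
--     # Divide-and-conquer: for a segment, compute (total of (x-1), minimum prefix
--     # sum over prefix lengths 0..len). Fuel before step k is the prefix sum of
--     # (x-1) over the first k checkpoints, so A's condition is exactly that the
--     # minimum prefix sum over nums[:-1] (lengths 0..n-1) is nonnegative.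
--     def seg(xs):
--         if not xs:
--             return (0, 0)
--         if len(xs) == 1:
--             v = xs[0] - 1
--             return (v, min(0, v))
--         mid = len(xs) // 2
--         sL, mL = seg(xs[:mid])
--         sR, mR = seg(xs[mid:])
--         return (sL + sR, min(mL, sL + mR))
--     return seg(nums[:-1])[1] >= 0
-- ===== Notes on version B (the rewrite author's own statement) =====
-- stated objective: alternative
-- what changed: B replaces A's sequential early-return fuel loop by a divide-and-conquer computation: each half-segment is summarized as (sum of (x-1), minimum prefix sum), the summaries are combined associatively, and the answer is whether the minimum prefix sum over nums[:-1] is nonnegative.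
import Mathlib
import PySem

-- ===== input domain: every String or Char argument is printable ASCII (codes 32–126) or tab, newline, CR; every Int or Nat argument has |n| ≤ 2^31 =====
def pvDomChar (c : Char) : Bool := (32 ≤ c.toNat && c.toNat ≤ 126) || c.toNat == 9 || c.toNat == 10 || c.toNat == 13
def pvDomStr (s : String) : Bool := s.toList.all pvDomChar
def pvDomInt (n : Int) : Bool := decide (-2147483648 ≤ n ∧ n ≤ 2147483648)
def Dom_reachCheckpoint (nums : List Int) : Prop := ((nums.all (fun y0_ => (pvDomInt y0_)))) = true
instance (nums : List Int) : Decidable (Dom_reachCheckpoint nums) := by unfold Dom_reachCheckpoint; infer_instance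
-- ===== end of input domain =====

-- B replaces A's sequential early-return fuel loop by a divide-and-conquer
-- (sum, min-prefix) segment combination over nums[:-1]; return values proved equal.

-- ===== PORT A =====
def reachCheckpointGo : List Int → Int → Bool
  | [], _ => true
  | num :: rest, fuel =>
    if fuel < 0 then false
    else reachCheckpointGo rest (fuel - 1 + num)

def reachCheckpoint (nums : List Int) : Bool := reachCheckpointGo nums 0

-- ===== PORT B =====
-- seg xs = (sum of (x-1) over xs, minimum prefix sum of (x-1) over prefix lengths 0..len xs).
-- Python's xs[:mid] / xs[mid:] with 0 ≤ mid ≤ len xs are exactly List.take / List.drop.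
def pvSeg : List Int → Int × Int
  | [] => (0, 0)
  | [x] => (x - 1, min 0 (x - 1))
  | x :: y :: rest =>
      let xs := x :: y :: rest
      let mid := xs.length / 2
      let L := pvSeg (xs.take mid)
      let R := pvSeg (xs.drop mid)
      (L.1 + R.1, min L.2 (L.1 + R.2))
termination_by xs => xs.length
decreasing_by
  · simp only [List.length_take]; simp; omega
  · simp only [List.length_drop]; simp; omega

-- Python's nums[:-1] is exactly List.dropLast (PySem.List.slice_to_neg_one).
def reachCheckpoint_alt (nums : List Int) : Bool :=
  decide (0 ≤ (pvSeg nums.dropLast).2)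

-- ===== PRECONDITION & SPEC =====
def Spec_reachCheckpoint (nums : List Int) (out : Bool) : Prop := out = reachCheckpoint_alt nums
instance (nums : List Int) (out : Bool) : Decidable (Spec_reachCheckpoint nums out) := by unfold Spec_reachCheckpoint; infer_instance

-- ===== CLAIM (what is proved, stated in full; the proofs are below) =====
def Claim_equal_reachCheckpoint : Prop := ∀ (nums : List Int), Dom_reachCheckpoint nums → Spec_reachCheckpoint nums (reachCheckpoint nums)

-- ===== LEMMAS AND PROOFS =====

-- total of (x-1) over a list
def pvS : List Int → Int
  | [] => 0
  | x :: r => (x - 1) + pvS r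

-- minimum prefix sum of (x-1) over prefix lengths 0..len
def pvM : List Int → Int
  | [] => 0
  | x :: r => min 0 ((x - 1) + pvM r)

theorem pvS_append (xs ys : List Int) : pvS (xs ++ ys) = pvS xs + pvS ys := by
  induction xs with
  | nil => simp [pvS]
  | cons x r ih => simp [pvS, ih]; ring

theorem pvM_nonpos (xs : List Int) : pvM xs ≤ 0 := by
  cases xs with
  | nil => simp [pvM]
  | cons x r => simp [pvM]

theorem pvM_append (xs ys : List Int) : pvM (xs ++ ys) = min (pvM xs) (pvS xs + pvM ys) := by
  induction xs with
  | nil => have := pvM_nonpos ys; simp only [List.nil_append, pvM, pvS]; omega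
  | cons x r ih => simp only [List.cons_append, pvM, pvS, ih]; omega

theorem pvSeg_eq (xs : List Int) : pvSeg xs = (pvS xs, pvM xs) := by
  induction xs using pvSeg.induct with
  | case1 => simp [pvSeg, pvS, pvM]
  | case2 x => rw [pvSeg]; simp [pvS, pvM]
  | case3 x y rest xs mid ihL ihR =>
      rw [pvSeg]
      simp only at ihL ihR
      simp only [xs, mid] at *
      rw [ihL, ihR]
      have h := List.take_append_drop ((x :: y :: rest).length / 2) (x :: y :: rest)
      simp only [List.length_cons] at h ⊢
      simp only [Prod.mk.injEq]
      rw [← pvS_append, ← pvM_append, h]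
      exact ⟨rfl, rfl⟩

theorem pvGo_eq (num : Int) (rest : List Int) (t : Int) :
    reachCheckpointGo (num :: rest) t = decide (0 ≤ t + pvM (num :: rest).dropLast) := by
  induction rest generalizing num t with
  | nil =>
      have hd : ([num] : List Int).dropLast = [] := rfl
      rw [hd]
      simp only [pvM, reachCheckpointGo]
      by_cases h : t < 0
      · simp [h]
      · simp [h]; omega
  | cons r rs ih =>
      rw [show reachCheckpointGo (num :: r :: rs) t
            = if t < 0 then false else reachCheckpointGo (r :: rs) (t - 1 + num) from rfl]
      rw [ih r (t - 1 + num)]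
      have hd : (num :: r :: rs).dropLast = num :: (r :: rs).dropLast := rfl
      rw [hd]
      simp only [pvM]
      by_cases h : t < 0
      · simp [h]
        omega
      · simp [h]
        omega

-- ===== VERDICT (by name: the statement is the Claim_ definition above) =====
theorem reachCheckpoint_spec : Claim_equal_reachCheckpoint := by
  intro nums _
  show reachCheckpoint nums = reachCheckpoint_alt nums
  unfold reachCheckpoint reachCheckpoint_alt
  rw [pvSeg_eq]
  cases nums with
  | nil => simp [reachCheckpointGo, pvM]
  | cons num rest => rw [pvGo_eq]; simp
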